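-- pv_equiv track=rewrite | github.com/gdankov/Python-FMI | Challenges/picture_manipulation[greyscale]/solution.py | create_histogram
-- ===== SOURCE A (Python) =====
-- from collections import defaultdict
--
-- def update_pixel_info(color, values, pixel):
--     pixel_color = 0
--
--     if color is 'red':
--         pixel_color = pixel[0]
--     elif color is 'green':
--         pixel_color = pixel[1]
--     else:
--         pixel_color = pixel[2]
--
--     values[pixel_color] += 1
--
-- def create_histogram(picture):
--     histogram = {'red': defaultdict(int),
--                  'green': defaultdict(int),
--                  'blue': defaultdict(int)
--                  }
--
--     for row in picture:
--         for pixel in row: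
--             update_pixel_info('red', histogram['red'], pixel)
--             update_pixel_info('green', histogram['green'], pixel)
--             update_pixel_info('blue', histogram['blue'], pixel)
--
--     return histogram
-- ===== SOURCE B (Python) =====
-- from collections import defaultdict
--
-- def _channel_hist(vals):
--     # distinct-then-count: no running tally; each count is a full scan
--     h = defaultdict(int)
--     for v in dict.fromkeys(vals):
--         h[v] = vals.count(v)
--     return h
--
-- def create_histogram(picture):
--     flat = [pixel for row in picture for pixel in row]
--     return {'red':   _channel_hist([p[0] for p in flat]),
--             'green': _channel_hist([p[1] for p in flat]),
--             'blue':  _channel_hist([p[2] for p in flat])}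
-- ===== Notes on version B (the rewrite author's own statement) =====
-- stated objective: alternative
-- what changed: Replaces A's single interleaved pass that increments per-channel tallies pixel by pixel with a distinct-then-count strategy: flatten the picture, take each channel's distinct values in first-occurrence order (dict.fromkeys), and compute every count by a separate list.count scan, so no incremental counter is maintained at all.
import Mathlib
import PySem

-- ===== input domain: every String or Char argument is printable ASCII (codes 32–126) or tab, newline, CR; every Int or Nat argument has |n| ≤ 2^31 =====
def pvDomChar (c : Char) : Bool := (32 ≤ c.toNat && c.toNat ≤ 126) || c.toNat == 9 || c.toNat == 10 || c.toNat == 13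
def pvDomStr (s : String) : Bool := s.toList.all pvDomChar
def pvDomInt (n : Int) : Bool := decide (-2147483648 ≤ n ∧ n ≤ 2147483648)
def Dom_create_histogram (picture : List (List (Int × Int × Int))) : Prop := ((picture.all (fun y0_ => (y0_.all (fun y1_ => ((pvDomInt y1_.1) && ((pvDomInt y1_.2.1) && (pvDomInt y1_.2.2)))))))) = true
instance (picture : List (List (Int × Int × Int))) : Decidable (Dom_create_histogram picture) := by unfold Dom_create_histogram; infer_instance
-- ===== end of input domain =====

-- B replaces A's interleaved incremental tally with a distinct-then-count strategy per channel (alternative decomposition; not faster).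


-- ===== PORT A =====
-- 'color is "red"' on interned literals behaves as string equality for these call sites; ported as ==.
def update_pixel_info (color : String) (values : PySem.Dict Int Int) (pixel : Int × Int × Int) : PySem.Dict Int Int :=
  let pixel_color : Int :=
    if color == "red" then pixel.1
    else if color == "green" then pixel.2.1
    else pixel.2.2
  values.modify pixel_color 0 (· + 1)

def create_histogram (picture : List (List (Int × Int × Int))) : List (String × List (Int × Int)) :=
  let histogram : PySem.Dict String (PySem.Dict Int Int) :=
    PySem.Dict.ofList [("red", PySem.Dict.empty), ("green", PySem.Dict.empty), ("blue", PySem.Dict.empty)]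
  let histogram := picture.foldl (fun h row =>
    row.foldl (fun h pixel =>
      let h := h.insert "red" (update_pixel_info "red" (h.getD "red" PySem.Dict.empty) pixel)
      let h := h.insert "green" (update_pixel_info "green" (h.getD "green" PySem.Dict.empty) pixel)
      h.insert "blue" (update_pixel_info "blue" (h.getD "blue" PySem.Dict.empty) pixel)) h) histogram
  histogram.items.map (fun kv => (kv.1, kv.2.items))

-- ===== PORT B =====
-- distinct-then-count: iterate the distinct values (dict.fromkeys order) and set each count by a list.count scan
def channel_hist (vals : List Int) : PySem.Dict Int Int :=
  (PySem.List.dedup vals).foldl (fun h v => h.insert v ((vals.count v : Int))) PySem.Dict.empty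

def create_histogram_alt (picture : List (List (Int × Int × Int))) : List (String × List (Int × Int)) :=
  let flat := picture.flatMap (fun row => row)
  [("red",   (channel_hist (flat.map (fun p => p.1))).items),
   ("green", (channel_hist (flat.map (fun p => p.2.1))).items),
   ("blue",  (channel_hist (flat.map (fun p => p.2.2))).items)]

-- ===== PRECONDITION & SPEC =====
def Spec_create_histogram (picture : List (List (Int × Int × Int))) (out : List (String × List (Int × Int))) : Prop := out = create_histogram_alt picture
instance (picture : List (List (Int × Int × Int))) (out : List (String × List (Int × Int))) : Decidable (Spec_create_histogram picture out) := by unfold Spec_create_histogram; infer_instance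

-- ===== CLAIM (what is proved, stated in full; the proofs are below) =====
def Claim_equal_create_histogram : Prop := ∀ (picture : List (List (Int × Int × Int))), Dom_create_histogram picture → Spec_create_histogram picture (create_histogram picture)

-- ===== LEMMAS AND PROOFS =====

-- one pixel step of A's loop on the literal three-key dict, split into the three inner updates
theorem step_three (r g b : PySem.Dict Int Int) (p : Int × Int × Int) :
    (let h : PySem.Dict String (PySem.Dict Int Int) :=
        PySem.Dict.ofList [("red", r), ("green", g), ("blue", b)]
     let h := h.insert "red" (update_pixel_info "red" (h.getD "red" PySem.Dict.empty) p)
     let h := h.insert "green" (update_pixel_info "green" (h.getD "green" PySem.Dict.empty) p)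
     h.insert "blue" (update_pixel_info "blue" (h.getD "blue" PySem.Dict.empty) p))
    = PySem.Dict.ofList [("red", r.modify p.1 0 (· + 1)),
                         ("green", g.modify p.2.1 0 (· + 1)),
                         ("blue", b.modify p.2.2 0 (· + 1))] := by
  rfl

-- A's fold over the pixels of a row factors into three independent per-channel folds
theorem fold_row (ps : List (Int × Int × Int)) (r g b : PySem.Dict Int Int) :
    ps.foldl (fun h pixel =>
      let h := h.insert "red" (update_pixel_info "red" (h.getD "red" PySem.Dict.empty) pixel)
      let h := h.insert "green" (update_pixel_info "green" (h.getD "green" PySem.Dict.empty) pixel)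
      h.insert "blue" (update_pixel_info "blue" (h.getD "blue" PySem.Dict.empty) pixel))
      (PySem.Dict.ofList [("red", r), ("green", g), ("blue", b)])
    = PySem.Dict.ofList
        [("red",   ps.foldl (fun d p => d.modify p.1 0 (· + 1)) r),
         ("green", ps.foldl (fun d p => d.modify p.2.1 0 (· + 1)) g),
         ("blue",  ps.foldl (fun d p => d.modify p.2.2 0 (· + 1)) b)] := by
  induction ps generalizing r g b with
  | nil => rfl
  | cons p ps ih =>
      simp only [List.foldl_cons]
      rw [step_three r g b p]
      exact ih _ _ _

-- A's whole nested fold factors into three per-channel folds over the flattened pixels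
theorem fold_pic (rows : List (List (Int × Int × Int))) (r g b : PySem.Dict Int Int) :
    rows.foldl (fun h row =>
      row.foldl (fun h pixel =>
        let h := h.insert "red" (update_pixel_info "red" (h.getD "red" PySem.Dict.empty) pixel)
        let h := h.insert "green" (update_pixel_info "green" (h.getD "green" PySem.Dict.empty) pixel)
        h.insert "blue" (update_pixel_info "blue" (h.getD "blue" PySem.Dict.empty) pixel)) h)
      (PySem.Dict.ofList [("red", r), ("green", g), ("blue", b)])
    = PySem.Dict.ofList
        [("red",   (rows.flatMap (fun row => row)).foldl (fun d p => d.modify p.1 0 (· + 1)) r),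
         ("green", (rows.flatMap (fun row => row)).foldl (fun d p => d.modify p.2.1 0 (· + 1)) g),
         ("blue",  (rows.flatMap (fun row => row)).foldl (fun d p => d.modify p.2.2 0 (· + 1)) b)] := by
  induction rows generalizing r g b with
  | nil => rfl
  | cons row rows ih =>
      simp only [List.foldl_cons, List.flatMap_cons, List.foldl_append]
      rw [fold_row]
      exact ih _ _ _

-- a per-channel fold is Counter of the mapped channel values
theorem fold_counter {α : Type} (xs : List α) (f : α → Int) :
    xs.foldl (fun d p => d.modify (f p) 0 (· + 1)) PySem.Dict.empty
      = PySem.Dict.counter (xs.map f) := by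
  rw [PySem.Dict.counter_eq_foldl, List.foldl_map]

-- B's distinct-then-count dict lists exactly Counter's items
theorem channel_hist_items (vals : List Int) :
    (channel_hist vals).items = (PySem.Dict.counter vals).items := by
  have h := PySem.Dict.items_foldl_insert_fresh (l := PySem.List.dedup vals)
      (k := fun v => v) (v := fun v => (vals.count v : Int)) (d := PySem.Dict.empty)
      (by intro a _; rfl) (by simp [PySem.List.nodup_dedup vals])
  simp only [channel_hist, PySem.Dict.items_counter]
  simpa [PySem.List.dedup_eq_ofList] using h

-- ===== VERDICT (by name: the statement is the Claim_ definition above) =====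
theorem create_histogram_spec : Claim_equal_create_histogram := by
  intro picture _
  show create_histogram picture = create_histogram_alt picture
  simp only [create_histogram, create_histogram_alt]
  rw [fold_pic]
  simp only [fold_counter, channel_hist_items]
  rfl
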